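-- pv_equiv track=rewrite | github.com/esmanuray/BotnetAttackAnalysis | dataPreview.py | group_by_layer
-- ===== SOURCE A (Python) =====
-- def group_by_layer(cell):
--     grouped_data = []
--     current_group = []
--     for line in cell:
--         if line.startswith("Layer"):
--             if current_group:
--                 grouped_data.append(current_group)
--             current_group = [line]
--         else:
--             current_group.append(line)
--     if current_group:
--         grouped_data.append(current_group)
--     return grouped_data
-- ===== SOURCE B (Python) =====
-- def group_by_layer(cell):
--     # Recursive span decomposition: each group is the next line plus the run of
--     # following non-"Layer" lines; recurse on the remainder.
--     lines = list(cell)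
--     if not lines:
--         return []
--     head, rest = lines[0], lines[1:]
--     body = []
--     for l in rest:
--         if l.startswith("Layer"):
--             break
--         body.append(l)
--     return [[head] + body] + group_by_layer(rest[len(body):])
-- ===== Notes on version B (the rewrite author's own statement) =====
-- stated objective: alternative
-- what changed: Replaces A's single loop with mutable accumulator/flush state by a recursive span decomposition: take the head line plus the following run of non-'Layer' lines as one group, then recurse on the remainder.
import Mathlib
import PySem

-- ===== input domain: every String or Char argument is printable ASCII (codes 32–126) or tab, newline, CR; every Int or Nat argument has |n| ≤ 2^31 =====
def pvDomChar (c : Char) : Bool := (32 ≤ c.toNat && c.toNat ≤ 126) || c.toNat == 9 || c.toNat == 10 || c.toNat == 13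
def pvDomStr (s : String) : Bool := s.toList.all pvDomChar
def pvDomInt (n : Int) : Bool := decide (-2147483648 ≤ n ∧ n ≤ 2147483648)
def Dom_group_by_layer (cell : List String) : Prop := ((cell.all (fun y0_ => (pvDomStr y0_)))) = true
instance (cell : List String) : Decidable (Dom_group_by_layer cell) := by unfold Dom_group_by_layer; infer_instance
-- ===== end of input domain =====

-- B replaces A's accumulator/flush loop by a recursive span decomposition; return value only, no speed claim.
-- ===== PORT A =====
def group_by_layer (cell : List String) : List (List String) :=
  let st := cell.foldl (fun (st : List (List String) × List String) line =>
    if PySem.Str.startswith line "Layer" then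
      ((if st.2 ≠ [] then st.1 ++ [st.2] else st.1), [line])
    else
      (st.1, st.2 ++ [line])) ([], [])
  if st.2 ≠ [] then st.1 ++ [st.2] else st.1

-- ===== PORT B =====
-- the body-collecting loop with break is ported as List.takeWhile; rest[len(body):] as List.drop
def group_by_layer_alt (cell : List String) : List (List String) :=
  match cell with
  | [] => []
  | head :: rest =>
      let body := rest.takeWhile (fun l => !PySem.Str.startswith l "Layer")
      ([head] ++ body) :: group_by_layer_alt (rest.drop body.length)
  termination_by cell.length
  decreasing_by simp [List.length_drop]

-- ===== PRECONDITION & SPEC =====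
def Spec_group_by_layer (cell : List String) (out : List (List String)) : Prop := out = group_by_layer_alt cell
instance (cell : List String) (out : List (List String)) : Decidable (Spec_group_by_layer cell out) := by unfold Spec_group_by_layer; infer_instance

-- ===== CLAIM (what is proved, stated in full; the proofs are below) =====
def Claim_equal_group_by_layer : Prop := ∀ (cell : List String), Dom_group_by_layer cell → Spec_group_by_layer cell (group_by_layer cell)

-- ===== LEMMAS AND PROOFS =====

lemma pv_drop_takeWhile {α : Type} (p : α → Bool) (l : List α) :
    l.drop (l.takeWhile p).length = l.dropWhile p := by
  induction l with
  | nil => simp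
  | cons a l ih => by_cases h : p a <;> simp [h, ih]

lemma pv_alt_cons (head : String) (rest : List String) :
    group_by_layer_alt (head :: rest) =
      (head :: rest.takeWhile (fun l => !PySem.Str.startswith l "Layer")) ::
        group_by_layer_alt (rest.dropWhile (fun l => !PySem.Str.startswith l "Layer")) := by
  rw [group_by_layer_alt]
  simp [pv_drop_takeWhile]

lemma pv_inv (lines : List String) : ∀ (g : List (List String)) (c : List String), c ≠ [] →
    (let st := lines.foldl (fun (st : List (List String) × List String) line =>
        if PySem.Str.startswith line "Layer" then
          ((if st.2 ≠ [] then st.1 ++ [st.2] else st.1), [line])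
        else (st.1, st.2 ++ [line])) (g, c)
      if st.2 ≠ [] then st.1 ++ [st.2] else st.1) =
    g ++ (c ++ lines.takeWhile (fun l => !PySem.Str.startswith l "Layer")) ::
      group_by_layer_alt (lines.dropWhile (fun l => !PySem.Str.startswith l "Layer")) := by
  induction lines with
  | nil =>
    intro g c hc
    simp [group_by_layer_alt, hc]
  | cons l rest ih =>
    intro g c hc
    by_cases h : PySem.Str.startswith l "Layer" = true
    · have hx := ih (g ++ [c]) [l] (by simp)
      simp only at hx
      simp only [List.foldl_cons, h, if_pos, hc, ne_eq, not_false_eq_true]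
      have h' : PySem.Chars.startswith l.toList ['L','a','y','e','r'] = true := by simpa using h
      simp [List.takeWhile_cons, List.dropWhile_cons] at hx ⊢
      simp [hx, h']
      rw [pv_alt_cons]
      simp
    · simp only [Bool.not_eq_true] at h
      have hx := ih g (c ++ [l]) (by simp)
      simp only at hx
      simp only [List.foldl_cons, h, Bool.false_eq_true, if_false]
      have h' : PySem.Chars.startswith l.toList ['L','a','y','e','r'] = false := by simpa using h
      simp [List.takeWhile_cons, List.dropWhile_cons] at hx ⊢
      simp [hx, h']

-- ===== VERDICT (by name: the statement is the Claim_ definition above) =====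
theorem group_by_layer_spec : Claim_equal_group_by_layer := by
  intro cell _
  unfold Spec_group_by_layer group_by_layer
  match cell with
  | [] => simp [group_by_layer_alt]
  | head :: rest =>
    have hstep : (List.foldl (fun (st : List (List String) × List String) line =>
        if PySem.Str.startswith line "Layer" then
          ((if st.2 ≠ [] then st.1 ++ [st.2] else st.1), [line])
        else (st.1, st.2 ++ [line])) ([], []) (head :: rest))
        = (List.foldl (fun (st : List (List String) × List String) line =>
        if PySem.Str.startswith line "Layer" then
          ((if st.2 ≠ [] then st.1 ++ [st.2] else st.1), [line])
        else (st.1, st.2 ++ [line])) ([], [head]) rest) := by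
      by_cases h : PySem.Str.startswith head "Layer" = true <;> simp_all
    simp only [hstep]
    rw [pv_inv rest [] [head] (by simp), pv_alt_cons]
    simp
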